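-- pv_equiv track=rewrite | github.com/parasiitism/AlgoDaily | leetcode/2522/main.py | minimumPartition
-- ===== SOURCE A (Python) =====
-- def minimumPartition(s: str, k: int) -> int:
--     nums = []
--     i = 0
--     while i < len(s):
--         j = i
--         cur = s[j]
--         if int(cur) > k:
--             return -1
--         while j+1 < len(s) and int(cur+s[j+1]) <= k:
--             cur += s[j+1]
--             j += 1
--         nums.append(int(cur))
--         i = j+1
--     return len(nums)
-- ===== SOURCE B (Python) =====
-- def _num_digits(t: int) -> int:
--     m = 1
--     while t >= 10:
--         t //= 10
--         m += 1
--     return m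
--
--
-- def minimumPartition(s: str, k: int) -> int:
--     # jump algorithm: a greedy segment is a run of leading zeros followed by
--     # exactly m = numdigits(k) significant digits if they fit under k, else m-1,
--     # so we jump over whole segments arithmetically instead of accumulating a value
--     if k < 0:
--         return -1 if s else 0
--     m = _num_digits(k)
--     n = len(s)
--     count = 0
--     i = 0
--     while i < n:
--         j = i
--         while j < n and s[j] == '0':
--             j += 1
--         if j == n:
--             count += 1
--             break
--         if int(s[j]) > k:
--             return -1
--         if j + m <= n and int(s[j:j+m]) <= k:
--             i = j + m
--         else:
--             i = j + m - 1
--         count += 1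
--     return count
-- ===== Notes on version B (the rewrite author's own statement) =====
-- stated objective: alternative
-- what changed: Instead of growing each segment digit-by-digit (A's nested greedy), B precomputes m = number of decimal digits of k and jumps over a whole segment at once: a segment is a run of leading zeros plus exactly m significant digits if their value fits under k, else m-1; no running value is ever accumulated across the segment.
-- outside the precondition, e.g. on minimumPartition('9a', 5): A returns -1, B returns -1; on minimumPartition('1 ', 2): A returns 1, B raises ValueError
import Mathlib
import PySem

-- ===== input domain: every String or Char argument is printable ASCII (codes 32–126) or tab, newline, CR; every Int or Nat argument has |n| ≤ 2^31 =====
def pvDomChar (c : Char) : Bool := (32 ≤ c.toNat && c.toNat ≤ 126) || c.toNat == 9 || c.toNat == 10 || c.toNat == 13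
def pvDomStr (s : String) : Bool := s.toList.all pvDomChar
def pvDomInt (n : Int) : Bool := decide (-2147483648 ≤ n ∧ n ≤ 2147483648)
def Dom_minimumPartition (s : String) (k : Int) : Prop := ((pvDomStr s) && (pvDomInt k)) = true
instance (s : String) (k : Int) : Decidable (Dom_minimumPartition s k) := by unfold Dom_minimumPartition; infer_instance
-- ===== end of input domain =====

-- B replaces A's per-digit greedy (grow a substring, re-parse it with int() at
-- every extension) by segment jumps: with m = number of decimal digits of k, a
-- greedy segment is its leading zeros plus m significant digits if they fit
-- under k, else m-1 of them, so B skips whole segments arithmetically.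

-- int(t) for a NONEMPTY ALL-DIGIT string t is ported by hand as the base-10 digit
-- fold below: exact there (no sign/space/underscore can occur), and Pre_ admits
-- only all-digit strings, so every int() call both programs make falls in this case.
def pvDigitVal (c : Char) : Int := (c.toNat : Int) - 48
def pvIntDigits (t : List Char) : Int := t.foldl (fun a c => a * 10 + pvDigitVal c) 0

-- ===== PORT A =====
-- inner while: extend cur with the next char while int(cur + s[j+1]) <= k;
-- returns (final cur, remaining suffix after j)
def pvInnerA (k : Int) (cur : List Char) (rest : List Char) : List Char × List Char :=
  match rest with
  | [] => (cur, [])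
  | c :: rs =>
      if pvIntDigits (cur ++ [c]) ≤ k then pvInnerA k (cur ++ [c]) rs
      else (cur, c :: rs)

theorem pvInnerA_snd_length (k : Int) (cur rest : List Char) :
    (pvInnerA k cur rest).2.length ≤ rest.length := by
  induction rest generalizing cur with
  | nil => simp [pvInnerA]
  | cons c rs ih =>
      simp only [pvInnerA]
      split
      · exact le_trans (ih (cur ++ [c])) (by simp)
      · simp

-- outer while over the suffix starting at i, accumulating nums
def pvOuterA (k : Int) (rest : List Char) (nums : List Int) : Int :=
  match rest with
  | [] => (nums.length : Int)
  | c :: rs =>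
      if pvIntDigits [c] > k then -1
      else
        let p := pvInnerA k [c] rs
        pvOuterA k p.2 (nums ++ [pvIntDigits p.1])
termination_by rest.length
decreasing_by
  simpa using Nat.lt_succ_of_le (pvInnerA_snd_length k [c] rs)

def minimumPartition (s : String) (k : Int) : Int := pvOuterA k s.toList []

-- ===== PORT B =====
-- m = _num_digits(k): 'm = 1; while t >= 10: t //= 10; m += 1'
def pvNumDigits (t : Int) : Nat :=
  if h : 10 ≤ t then pvNumDigits (PySem.Int.floordiv t 10) + 1 else 1
termination_by t.toNat
decreasing_by
  rw [PySem.Int.floordiv_eq_ediv_of_pos (by omega : (0:Int) < 10)]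
  omega

theorem pvNumDigits_pos (t : Int) : 1 ≤ pvNumDigits t := by
  rw [pvNumDigits]; split <;> omega

-- inner 'while j < n and s[j] == '0': j += 1' (returns the suffix from j)
def pvSkipZeros (l : List Char) : List Char :=
  match l with
  | [] => []
  | c :: rs => if c == '0' then pvSkipZeros rs else c :: rs

theorem pvSkipZeros_length (l : List Char) : (pvSkipZeros l).length ≤ l.length := by
  induction l with
  | nil => simp [pvSkipZeros]
  | cons c rs ih =>
      simp only [pvSkipZeros]
      split
      · simp; omega
      · simp

-- outer while: one iteration per segment; m carries the proof 1 ≤ m (always true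
-- of _num_digits's result) only to establish termination
def pvOuterB (k : Int) (m : Nat) (hm : 1 ≤ m) (l : List Char) (count : Int) : Int :=
  match h0 : l with
  | [] => count
  | _ :: _ =>
    match hr : pvSkipZeros l with
    | [] => count + 1
    | c :: _ =>
      if h1 : pvDigitVal c > k then -1
      else if h2 : m ≤ (pvSkipZeros l).length ∧ pvIntDigits ((pvSkipZeros l).take m) ≤ k then
        pvOuterB k m hm ((pvSkipZeros l).drop m) (count + 1)
      else
        pvOuterB k m hm ((pvSkipZeros l).drop (m - 1)) (count + 1)
termination_by l.length
decreasing_by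
  · have h3 := pvSkipZeros_length l
    have h4 := congrArg List.length hr
    have h6 := congrArg List.length h0
    simp only [List.length_cons] at h4 h6
    simp only [List.length_drop, List.length_cons]
    omega
  · have h3 := pvSkipZeros_length l
    have h4 := congrArg List.length hr
    simp only [List.length_cons] at h4
    have h5 : 2 ≤ m := by
      rcases Nat.lt_or_ge m 2 with hlt | hge
      · exfalso
        have hm1 : m = 1 := by omega
        apply h2
        refine ⟨by omega, ?_⟩
        rw [hm1, hr]
        simpa [pvIntDigits] using not_lt.mp h1
      · exact hge
    have h6 := congrArg List.length h0
    simp only [List.length_cons] at h4 h6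
    simp only [List.length_drop, List.length_cons]
    omega

def minimumPartition_alt (s : String) (k : Int) : Int :=
  if k < 0 then (if s.toList = [] then 0 else -1)
  else pvOuterB k (pvNumDigits k) (pvNumDigits_pos k) s.toList 0

-- ===== PRECONDITION & SPEC =====
-- Pre_ restricts to all-digit strings — the function's stated domain (a string of
-- digits partitioned by value): on any other string int() raises ValueError in at
-- least one program, except that both may return -1 first when a digit exceeding k
-- is seen before the bad character, and A alone may absorb whitespace glued to a
-- digit through int()'s stripping (both corners cited in the claim).
def Pre_minimumPartition (s : String) (k : Int) : Prop :=
  s.toList.all Char.isDigit = true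
instance (s : String) (k : Int) : Decidable (Pre_minimumPartition s k) := by
  unfold Pre_minimumPartition; infer_instance

def pvWitness_minimumPartition : String × Int := ("100048", 10)

def Spec_minimumPartition (s : String) (k : Int) (out : Int) : Prop := out = minimumPartition_alt s k
instance (s : String) (k : Int) (out : Int) : Decidable (Spec_minimumPartition s k out) := by unfold Spec_minimumPartition; infer_instance

-- ===== CLAIM (what is proved, stated in full; the proofs are below) =====
def Claim_equal_minimumPartition : Prop := ∀ (s : String) (k : Int), Dom_minimumPartition s k → Pre_minimumPartition s k → Spec_minimumPartition s k (minimumPartition s k)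

-- ===== LEMMAS AND PROOFS =====

def pvDigits (l : List Char) : Prop := ∀ c ∈ l, c.isDigit = true

theorem pvDigitVal_nonneg {c : Char} (h : c.isDigit = true) : 0 ≤ pvDigitVal c := by
  simp only [Char.isDigit, Bool.and_eq_true, decide_eq_true_eq] at h
  have : 48 ≤ c.toNat := h.1
  unfold pvDigitVal
  omega

theorem pvDigitVal_lt_ten {c : Char} (h : c.isDigit = true) : pvDigitVal c < 10 := by
  simp only [Char.isDigit, Bool.and_eq_true, decide_eq_true_eq] at h
  have : c.toNat ≤ 57 := h.2
  unfold pvDigitVal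
  omega

theorem pvDigitVal_pos {c : Char} (h : c.isDigit = true) (hz : c ≠ '0') : 1 ≤ pvDigitVal c := by
  simp only [Char.isDigit, Bool.and_eq_true, decide_eq_true_eq] at h
  have h48 : c.toNat ≠ 48 := by
    intro hc
    exact hz (Char.ext (UInt32.toNat_inj.mp (by simpa using hc)))
  have h1 : 48 ≤ c.toNat := h.1
  unfold pvDigitVal
  omega

theorem pvIntDigits_append (t : List Char) (c : Char) :
    pvIntDigits (t ++ [c]) = pvIntDigits t * 10 + pvDigitVal c := by
  simp [pvIntDigits, List.foldl_append]

theorem pvIntDigits_singleton (c : Char) : pvIntDigits [c] = pvDigitVal c := by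
  simp [pvIntDigits]

-- value of a continued parse: pvIntDigits (x ++ y) folds y from pvIntDigits x
theorem pvIntDigits_append_gen (x y : List Char) :
    pvIntDigits (x ++ y) = y.foldl (fun a c => a * 10 + pvDigitVal c) (pvIntDigits x) := by
  simp [pvIntDigits, List.foldl_append]

theorem pvIntDigits_zeros {zs : List Char} (h : ∀ c ∈ zs, c = '0') : pvIntDigits zs = 0 := by
  induction zs with
  | nil => rfl
  | cons c zs' ih =>
      have hc : c = '0' := h c (by simp)
      subst hc
      have : pvDigitVal '0' = 0 := by decide
      simpa [pvIntDigits, this] using ih (fun x hx => h x (by simp [hx]))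

theorem pvIntDigits_zeros_prefix {zs : List Char} (h : ∀ c ∈ zs, c = '0') (x : List Char) :
    pvIntDigits (zs ++ x) = pvIntDigits x := by
  rw [pvIntDigits_append_gen, pvIntDigits_zeros h]; rfl

-- digit-count bounds for k ≥ 0: k < 10^m, and 10^(m-1) ≤ k unless m = 1
theorem pvNumDigits_bounds (k : Int) (hk : 0 ≤ k) :
    k < 10 ^ (pvNumDigits k) ∧ (pvNumDigits k = 1 ∨ (10:Int) ^ (pvNumDigits k - 1) ≤ k) := by
  fun_induction pvNumDigits k with
  | case1 t h ih =>
      rw [PySem.Int.floordiv_eq_ediv_of_pos (by omega : (0:Int) < 10)] at *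
      obtain ⟨ih1, ih2⟩ := ih (by omega)
      set M := pvNumDigits (t / 10) with hM
      refine ⟨?_, Or.inr ?_⟩
      · have : t < (t / 10 + 1) * 10 := by omega
        calc t < (t / 10 + 1) * 10 := this
          _ ≤ 10 ^ M * 10 := by
              have hp : (0:Int) ≤ 10 := by norm_num
              exact mul_le_mul_of_nonneg_right (by omega) hp
          _ = 10 ^ (M + 1) := by rw [pow_succ]
      · have hM1 : 1 ≤ M := pvNumDigits_pos _
        have hlow : (10:Int) ^ (M - 1) ≤ t / 10 := by
          rcases ih2 with h1 | h2
          · rw [h1]; simpa using (by omega : (1:Int) ≤ t / 10)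
          · exact h2
        have : (10:Int) ^ (M - 1) * 10 ≤ (t / 10) * 10 := by
          exact mul_le_mul_of_nonneg_right hlow (by norm_num)
        have hpow : (10:Int) ^ (M - 1) * 10 = 10 ^ M := by
          rw [← pow_succ]
          congr 1
          omega
        have hsimp : (M + 1 - 1) = M := by omega
        rw [hsimp]
        have : (t / 10) * 10 ≤ t := by omega
        omega
  | case2 t h =>
      refine ⟨by simpa using (by omega : t < 10), Or.inl rfl⟩

-- leading zeros are absorbed into the open segment (value stays 0 ≤ k)
theorem pv_zeros_absorb (k : Int) (hk : 0 ≤ k) {zs : List Char} (hz : ∀ c ∈ zs, c = '0') :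
    ∀ (rest cur : List Char), pvIntDigits cur = 0 →
    pvInnerA k cur (zs ++ rest) = pvInnerA k (cur ++ zs) rest := by
  induction zs with
  | nil => intro rest cur _; simp
  | cons z zs' ih =>
      intro rest cur hcur
      have hz0 : z = '0' := hz z (by simp)
      subst hz0
      have hv : pvIntDigits (cur ++ ['0']) = 0 := by
        rw [pvIntDigits_append, hcur]; decide
      simp only [List.cons_append, pvInnerA]
      rw [if_pos (by rw [hv]; exact hk)]
      rw [ih (fun x hx => hz x (by simp [hx])) rest (cur ++ ['0']) hv]
      simp

-- a zeros prefix of the open segment never changes its value nor the loop's course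
theorem pv_zeros_prefix (k : Int) {zs : List Char} (hz : ∀ c ∈ zs, c = '0') :
    ∀ (rest cur : List Char),
    pvInnerA k (zs ++ cur) rest = (zs ++ (pvInnerA k cur rest).1, (pvInnerA k cur rest).2) := by
  intro rest
  induction rest with
  | nil => intro cur; simp [pvInnerA]
  | cons c rs ih =>
      intro cur
      have hval : pvIntDigits (zs ++ cur ++ [c]) = pvIntDigits (cur ++ [c]) := by
        rw [List.append_assoc]; exact pvIntDigits_zeros_prefix hz _
      simp only [pvInnerA, hval]
      split
      · rw [List.append_assoc]
        exact ih (cur ++ [c])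
      · simp

-- THE JUMP LEMMA: from a segment whose value v has t significant digits
-- (10^(t-1) ≤ v < 10^t ≤ 10^m), A's inner greedy consumes exactly m - t more
-- characters if their parse stays ≤ k, else m - t - 1 (take/drop clamp the caps)
theorem pv_sig (k : Int) (m : Nat) (hub : k < 10 ^ m) (hlb : m = 1 ∨ (10:Int) ^ (m-1) ≤ k) :
    ∀ (rest cur : List Char) (t : Nat), pvDigits rest → pvDigits cur →
    1 ≤ t → t ≤ m → (10:Int) ^ (t-1) ≤ pvIntDigits cur → pvIntDigits cur < 10 ^ t →
    pvIntDigits cur ≤ k →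
    pvInnerA k cur rest =
      if (m - t) ≤ rest.length ∧ pvIntDigits (cur ++ rest.take (m - t)) ≤ k
      then (cur ++ rest.take (m - t), rest.drop (m - t))
      else (cur ++ rest.take (m - t - 1), rest.drop (m - t - 1)) := by
  intro rest
  induction rest with
  | nil =>
      intro cur t _ _ _ _ _ _ hk'
      simp only [pvInnerA, List.take_nil, List.drop_nil, List.append_nil]
      split
      · rfl
      · rfl
  | cons c rs ih =>
      intro cur t hrest hcur ht1 htm hlo hhi hk'
      have hc : c.isDigit = true := hrest c (by simp)
      have hrs : pvDigits rs := fun x hx => hrest x (by simp [hx])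
      have hd0 := pvDigitVal_nonneg hc
      have hd9 := pvDigitVal_lt_ten hc
      have hv' : pvIntDigits (cur ++ [c]) = pvIntDigits cur * 10 + pvDigitVal c :=
        pvIntDigits_append cur c
      have hpt : (10:Int) ^ (t-1) * 10 = 10 ^ t := by
        rw [← pow_succ]; congr 1; omega
      by_cases hteq : t = m
      · -- t = m: the next digit must overflow, both sides stop here
        have hvk : ¬ pvIntDigits (cur ++ [c]) ≤ k := by
          have h10 : (10:Int) ^ m ≤ pvIntDigits cur * 10 := by
            calc (10:Int) ^ m = 10 ^ (t-1) * 10 := by rw [hpt, hteq]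
              _ ≤ pvIntDigits cur * 10 := mul_le_mul_of_nonneg_right hlo (by norm_num)
          rw [hv']
          omega
        have hmt : m - t = 0 := by omega
        simp only [pvInnerA, if_neg hvk, hmt]
        rw [if_pos ⟨by simp, by simpa using hk'⟩]
        simp
      · have htlt : t < m := lt_of_le_of_ne htm hteq
        have hu : m - t = (m - (t+1)) + 1 := by omega
        have harr : ∀ x : List Char, cur ++ c :: x = (cur ++ [c]) ++ x := by
          intro x; simp
        by_cases hvk : pvIntDigits (cur ++ [c]) ≤ k
        · -- the segment extends by c; recurse with t+1 significant digits
          simp only [pvInnerA, if_pos hvk]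
          have hlo' : (10:Int) ^ ((t+1)-1) ≤ pvIntDigits (cur ++ [c]) := by
            have : (10:Int) ^ t ≤ pvIntDigits cur * 10 := by
              rw [← hpt]; exact mul_le_mul_of_nonneg_right hlo (by norm_num)
            simp only [Nat.add_sub_cancel]
            rw [hv']; omega
          have hhi' : pvIntDigits (cur ++ [c]) < 10 ^ (t+1) := by
            have h1 : pvIntDigits cur * 10 ≤ (10 ^ t - 1) * 10 :=
              mul_le_mul_of_nonneg_right (by omega) (by norm_num)
            have h2 : ((10:Int) ^ t - 1) * 10 = 10 ^ (t+1) - 10 := by rw [pow_succ]; ring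
            rw [hv']; omega
          have hcur' : pvDigits (cur ++ [c]) := by
            intro x hx
            rcases List.mem_append.1 hx with h | h
            · exact hcur x h
            · simp at h; subst h; exact hc
          have hIH := ih (cur ++ [c]) (t+1) hrs hcur' (by omega) (by omega) hlo' hhi' hvk
          rw [hIH]
          have hcond : ((m - (t+1)) ≤ rs.length ∧
                pvIntDigits ((cur ++ [c]) ++ rs.take (m-(t+1))) ≤ k)
              ↔ ((m - t) ≤ (c :: rs).length ∧
                pvIntDigits (cur ++ (c :: rs).take (m-t)) ≤ k) := by
            rw [hu]
            simp only [List.take_succ_cons, List.length_cons]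
            rw [List.append_cons cur c (List.take (m - (t+1)) rs)]
            constructor
            · rintro ⟨h1, h2⟩; exact ⟨by omega, h2⟩
            · rintro ⟨h1, h2⟩; exact ⟨by omega, h2⟩
          by_cases hC : (m - t) ≤ (c :: rs).length ∧
              pvIntDigits (cur ++ (c :: rs).take (m-t)) ≤ k
          · rw [if_pos hC, if_pos (hcond.mpr hC)]
            rw [hu]
            simp only [List.take_succ_cons, List.drop_succ_cons]
            rw [List.append_cons cur c (List.take (m - (t+1)) rs)]
          · rw [if_neg hC, if_neg (fun h => hC (hcond.mp h))]
            have hu1 : 1 ≤ m - (t+1) := by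
              by_contra h0
              have hz0 : m - (t+1) = 0 := by omega
              apply hC
              apply hcond.mp
              rw [hz0]
              exact ⟨by omega, by simpa using hvk⟩
            have hu2 : m - t - 1 = (m - (t+1) - 1) + 1 := by omega
            have hu3 : m - (t+1) = (m - (t+1) - 1) + 1 := by omega
            rw [hu2, hu3]
            simp only [List.take_succ_cons, List.drop_succ_cons]
            simp
        · -- the segment stops before c; this forces t + 1 = m
          have hm2 : t + 1 = m := by
            by_contra hne
            have hm3 : 2 ≤ m := by omega
            have hp1 : pvIntDigits (cur ++ [c]) < 10 ^ (t+1) := by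
              have h1 : pvIntDigits cur * 10 ≤ (10 ^ t - 1) * 10 :=
                mul_le_mul_of_nonneg_right (by omega) (by norm_num)
              have h2 : ((10:Int) ^ t - 1) * 10 = 10 ^ (t+1) - 10 := by rw [pow_succ]; ring
              rw [hv']; omega
            have hp2 : (10:Int) ^ (t+1) ≤ 10 ^ (m-1) :=
              pow_le_pow_right₀ (by norm_num) (by omega)
            have hp3 : (10:Int) ^ (m-1) ≤ k := hlb.resolve_left (by omega)
            omega
          have hmt1 : m - t = 1 := by omega
          simp only [pvInnerA, if_neg hvk, hmt1]
          rw [if_neg ?hng]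
          case hng =>
            rintro ⟨_, hval⟩
            exact hvk (by simpa using hval)
          simp

theorem pvSkipZeros_decomp (l : List Char) :
    ∃ zs, l = zs ++ pvSkipZeros l ∧ ∀ c ∈ zs, c = '0' := by
  induction l with
  | nil => exact ⟨[], by simp [pvSkipZeros]⟩
  | cons c rs ih =>
      by_cases hc : c = '0'
      · obtain ⟨zs, h1, h2⟩ := ih
        refine ⟨c :: zs, ?_, ?_⟩
        · simp [pvSkipZeros, hc, ← h1]
        · intro x hx
          rcases List.mem_cons.mp hx with h | h
          · rw [h, hc]
          · exact h2 x h
      · refine ⟨[], ?_, by simp⟩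
        simp [pvSkipZeros, hc]

theorem pvSkipZeros_head {l : List Char} {c : Char} {rs : List Char}
    (h : pvSkipZeros l = c :: rs) : c ≠ '0' := by
  induction l with
  | nil => simp [pvSkipZeros] at h
  | cons c0 l0 ih =>
      simp only [pvSkipZeros] at h
      by_cases hc : c0 = '0'
      · rw [if_pos (by simp [hc])] at h
        exact ih h
      · rw [if_neg (by simp [hc])] at h
        obtain ⟨h1, h2⟩ := (List.cons.injEq c0 l0 c rs).mp h
        subst h1
        exact hc

theorem pvA_step (k : Int) (hk : 0 ≤ k) {l : List Char} (hl : pvDigits l) (hne : l ≠ [])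
    (nums : List Int) :
    pvOuterA k l nums =
      (match pvSkipZeros l with
       | [] => ((nums.length : Int) + 1)
       | c :: rs =>
          if pvDigitVal c > k then -1
          else pvOuterA k (pvInnerA k [c] rs).2 (nums ++ [pvIntDigits (pvInnerA k [c] rs).1])) := by
  obtain ⟨zs, hsplit, hz⟩ := pvSkipZeros_decomp l
  have hdv0 : pvDigitVal '0' = 0 := by decide
  cases zs with
  | nil =>
      simp only [List.nil_append] at hsplit
      cases hrc : pvSkipZeros l with
      | nil => exact absurd (hsplit.trans hrc) hne
      | cons c rs =>
          have hl' : l = c :: rs := hsplit.trans hrc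
          conv_lhs => rw [hl']
          simp only [pvOuterA, pvIntDigits_singleton]
  | cons z zs' =>
      have hz0 : z = '0' := hz z (by simp)
      have hz' : ∀ x ∈ zs', x = '0' := fun x hx => hz x (by simp [hx])
      subst hz0
      conv_lhs => rw [hsplit]
      simp only [List.cons_append, pvOuterA]
      rw [if_neg (by rw [pvIntDigits_singleton, hdv0]; omega)]
      rw [pv_zeros_absorb k hk hz' (pvSkipZeros l) ['0'] (by rw [pvIntDigits_singleton, hdv0])]
      simp only [List.cons_append, List.nil_append]
      have hzall : ∀ x ∈ '0' :: zs', x = '0' := hz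
      cases hrc : pvSkipZeros l with
      | nil =>
          simp only [pvInnerA]
          have : pvIntDigits (['0'] ++ zs') = 0 :=
            pvIntDigits_zeros (by intro x hx; exact hzall x (by simpa using hx))
          simp [pvOuterA]
      | cons c rs =>
          have hvzc : pvIntDigits (('0' :: zs') ++ [c]) = pvDigitVal c := by
            rw [pvIntDigits_zeros_prefix hzall]
            exact pvIntDigits_singleton c
          simp only [pvInnerA, hvzc]
          by_cases hdk : pvDigitVal c > k
          · rw [if_neg (by omega), if_pos hdk]
            have hv0 : pvIntDigits (['0'] ++ zs') = 0 :=
              pvIntDigits_zeros (by intro x hx; exact hzall x (by simpa using hx))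
            simp only [pvOuterA, pvIntDigits_singleton]
            rw [if_pos hdk]
          · rw [if_pos (by omega), if_neg hdk]
            have hpref := pv_zeros_prefix k hzall rs [c]
            simp only [List.cons_append] at hpref ⊢
            rw [hpref]
            have hval : pvIntDigits ('0' :: (zs' ++ (pvInnerA k [c] rs).1))
                = pvIntDigits (pvInnerA k [c] rs).1 := by
              rw [← List.cons_append]
              exact pvIntDigits_zeros_prefix hzall _
            rw [hval]

theorem pv_outer (k : Int) (hk : 0 ≤ k) :
    ∀ (n : Nat) (l : List Char) (nums : List Int), l.length ≤ n → pvDigits l →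
    pvOuterA k l nums = pvOuterB k (pvNumDigits k) (pvNumDigits_pos k) l (nums.length : Int) := by
  intro n
  induction n with
  | zero =>
      intro l nums hlen hd
      have hl0 : l = [] := by cases l with
        | nil => rfl
        | cons a b => simp at hlen
      subst hl0
      simp [pvOuterA, pvOuterB]
  | succ n' ih =>
      intro l nums hlen hd
      obtain ⟨hub, hlb⟩ := pvNumDigits_bounds k hk
      have hm1 : 1 ≤ pvNumDigits k := pvNumDigits_pos k
      cases l with
      | nil => simp [pvOuterA, pvOuterB]
      | cons c0 l0 =>
          rw [pvA_step k hk hd (by simp) nums]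
          rw [pvOuterB]
          obtain ⟨zs, hsplit, hz⟩ := pvSkipZeros_decomp (c0 :: l0)
          cases hrc : pvSkipZeros (c0 :: l0) with
          | nil => simp
          | cons c rs =>
              rw [hrc] at hsplit
              have hmemr : ∀ x ∈ c :: rs, x ∈ c0 :: l0 := by
                intro x hx; rw [hsplit]; exact List.mem_append_right zs hx
              have hc : c.isDigit = true := hd c (hmemr c (by simp))
              have hrsd : pvDigits rs := fun x hx => hd x (hmemr x (by simp [hx]))
              have hcz : c ≠ '0' := pvSkipZeros_head hrc
              have hd1 : 1 ≤ pvDigitVal c := pvDigitVal_pos hc hcz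
              have hd9 : pvDigitVal c < 10 := pvDigitVal_lt_ten hc
              simp only
              by_cases hdk : pvDigitVal c > k
              · rw [if_pos hdk, dif_pos hdk]
              · rw [if_neg hdk, dif_neg hdk]
                have hsig := pv_sig k (pvNumDigits k) hub hlb rs [c] 1 hrsd
                  (by intro x hx; simp at hx; subst hx; exact hc)
                  le_rfl hm1 (by simpa [pvIntDigits_singleton] using hd1)
                  (by simpa [pvIntDigits_singleton] using hd9)
                  (by rw [pvIntDigits_singleton]; omega)
                have hlen' : rs.length ≤ n' := by
                  have h1 := pvSkipZeros_length (c0 :: l0)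
                  rw [hrc] at h1
                  simp only [List.length_cons] at h1 hlen
                  omega
                have hmm : pvNumDigits k = (pvNumDigits k - 1) + 1 := by omega
                have htake : List.take (pvNumDigits k) (c :: rs)
                    = [c] ++ List.take (pvNumDigits k - 1) rs := by
                  conv_lhs => rw [hmm]
                  rw [List.take_succ_cons]; rfl
                have hdrop : List.drop (pvNumDigits k) (c :: rs)
                    = List.drop (pvNumDigits k - 1) rs := by
                  conv_lhs => rw [hmm]
                  rw [List.drop_succ_cons]
                by_cases hC : (pvNumDigits k - 1) ≤ rs.length ∧
                    pvIntDigits ([c] ++ List.take (pvNumDigits k - 1) rs) ≤ k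
                · rw [if_pos hC] at hsig
                  rw [hsig]
                  rw [dif_pos (by rw [htake]; exact ⟨by simp only [List.length_cons]; omega, hC.2⟩)]
                  rw [hdrop]
                  have := ih (List.drop (pvNumDigits k - 1) rs)
                    (nums ++ [pvIntDigits ([c] ++ List.take (pvNumDigits k - 1) rs)])
                    (by simp only [List.length_drop]; omega)
                    (fun x hx => hrsd x (List.mem_of_mem_drop hx))
                  rw [this]
                  simp
                · rw [if_neg hC] at hsig
                  rw [hsig]
                  have hm2 : 2 ≤ pvNumDigits k := by
                    by_contra h0
                    have hmeq : pvNumDigits k = 1 := by omega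
                    apply hC
                    rw [hmeq]
                    exact ⟨by omega, by simpa [pvIntDigits_singleton] using not_lt.mp hdk⟩
                  rw [dif_neg (by rw [htake]; rintro ⟨h1, h2⟩; exact hC ⟨by simp only [List.length_cons] at h1; omega, h2⟩)]
                  have hdrop' : List.drop (pvNumDigits k - 1) (c :: rs)
                      = List.drop (pvNumDigits k - 2) rs := by
                    have : pvNumDigits k - 1 = (pvNumDigits k - 2) + 1 := by omega
                    rw [this, List.drop_succ_cons]
                  have htk2 : pvNumDigits k - 1 - 1 = pvNumDigits k - 2 := by omega
                  rw [hdrop', htk2]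
                  have := ih (List.drop (pvNumDigits k - 2) rs)
                    (nums ++ [pvIntDigits ([c] ++ List.take (pvNumDigits k - 2) rs)])
                    (by simp only [List.length_drop]; omega)
                    (fun x hx => hrsd x (List.mem_of_mem_drop hx))
                  rw [this]
                  simp

-- ===== VERDICT (by name: the statement is the Claim_ definition above) =====
theorem minimumPartition_spec : Claim_equal_minimumPartition := by
  intro s k _ hpre
  unfold Spec_minimumPartition minimumPartition minimumPartition_alt
  have hd : pvDigits s.toList := by
    unfold Pre_minimumPartition at hpre; simpa [List.all_eq_true, pvDigits] using hpre
  by_cases hk : k < 0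
  · rw [if_pos hk]
    cases hs : s.toList with
    | nil => simp [pvOuterA]
    | cons c rs =>
        have hc : c.isDigit = true := by rw [hs] at hd; exact hd c (by simp)
        have : pvIntDigits [c] > k := by
          rw [pvIntDigits_singleton]
          have := pvDigitVal_nonneg hc
          omega
        simp [pvOuterA, this]
  · rw [if_neg hk]
    simpa using pv_outer k (by omega) s.toList.length s.toList [] le_rfl hd
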